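-- pv_equiv track=rewrite | github.com/dsneddon00/RSA-Encryption | main.py | alphabetToBase10
-- ===== SOURCE A (Python) =====
-- def alphabetToBase10(statement, alphabet):
--     number = 0
--     for s in statement:
--         i = alphabet.find(s)
--         if i != -1:
--             number *= len(alphabet)
--             number += i
--     return number
-- ===== SOURCE B (Python) =====
-- def alphabetToBase10(statement, alphabet):
--     digits = [i for i in (alphabet.find(s) for s in statement) if i != -1]
--     base = len(alphabet)
--     total = 0
--     weight = 1
--     for d in reversed(digits):
--         total += d * weight
--         weight *= base
--     return total
-- ===== Notes on version B (the rewrite author's own statement) =====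
-- stated objective: alternative
-- what changed: Replaces the single forward Horner-style fold (acc = acc*base + digit) with two separated passes: first extract the ordered list of digit values, then walk it in reverse summing digit*weight while a second accumulator multiplies the weight by the base.
import Mathlib
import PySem

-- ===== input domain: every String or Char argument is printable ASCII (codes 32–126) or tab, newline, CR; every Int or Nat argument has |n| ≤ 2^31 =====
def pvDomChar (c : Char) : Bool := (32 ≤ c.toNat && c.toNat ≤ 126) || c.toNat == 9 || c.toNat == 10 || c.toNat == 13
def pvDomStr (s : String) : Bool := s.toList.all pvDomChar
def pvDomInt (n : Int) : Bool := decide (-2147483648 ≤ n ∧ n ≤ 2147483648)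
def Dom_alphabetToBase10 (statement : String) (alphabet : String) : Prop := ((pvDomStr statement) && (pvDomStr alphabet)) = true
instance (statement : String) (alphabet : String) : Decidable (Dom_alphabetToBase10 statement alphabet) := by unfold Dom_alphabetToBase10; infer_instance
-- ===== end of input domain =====

-- B separates digit extraction from weighting: it builds the digit list, then sums
-- digit * base^position over the reversed list, instead of A's single Horner fold (alternative decomposition, same cost class).

-- ===== PORT A =====
def alphabetToBase10 (statement : String) (alphabet : String) : Int :=
  statement.toList.foldl (fun number s =>
    let i := PySem.Str.find alphabet (String.ofList [s])
    if i ≠ -1 then number * (PySem.Str.len alphabet) + i else number) 0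

-- ===== PORT B =====
def alphabetToBase10_alt (statement : String) (alphabet : String) : Int :=
  let digits : List Int :=
    (statement.toList.map (fun s => PySem.Str.find alphabet (String.ofList [s]))).filter
      (fun i => i ≠ -1)
  let base : Int := PySem.Str.len alphabet
  (digits.reverse.foldl (fun (tw : Int × Int) d => (tw.1 + d * tw.2, tw.2 * base)) (0, 1)).1

-- ===== PRECONDITION & SPEC =====
def Spec_alphabetToBase10 (statement : String) (alphabet : String) (out : Int) : Prop := out = alphabetToBase10_alt statement alphabet
instance (statement : String) (alphabet : String) (out : Int) : Decidable (Spec_alphabetToBase10 statement alphabet out) := by unfold Spec_alphabetToBase10; infer_instance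

-- ===== CLAIM (what is proved, stated in full; the proofs are below) =====
def Claim_equal_alphabetToBase10 : Prop := ∀ (statement : String) (alphabet : String), Dom_alphabetToBase10 statement alphabet → Spec_alphabetToBase10 statement alphabet (alphabetToBase10 statement alphabet)

-- ===== LEMMAS AND PROOFS =====

/-- Horner shift lemma: starting the Horner fold from `acc` just adds `acc * base^len`. -/
theorem horner_shift (base : Int) (ds : List Int) (acc : Int) :
    ds.foldl (fun n d => n * base + d) acc
      = acc * base ^ ds.length + ds.foldl (fun n d => n * base + d) 0 := by
  induction ds generalizing acc with
  | nil => simp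
  | cons d rest ih =>
    simp only [List.foldl_cons, List.length_cons]
    rw [ih (acc * base + d), ih (0 * base + d)]
    ring

/-- The reversed weighted pass (sum and running weight) equals the Horner fold. -/
theorem revweight_eq_horner (base : Int) (ds : List Int) (t w : Int) :
    ds.reverse.foldl (fun (tw : Int × Int) d => (tw.1 + d * tw.2, tw.2 * base)) (t, w)
      = (t + w * ds.foldl (fun n d => n * base + d) 0, w * base ^ ds.length) := by
  induction ds generalizing t w with
  | nil => simp
  | cons d rest ih =>
    simp only [List.reverse_cons, List.foldl_append, List.foldl_cons, List.foldl_nil,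
      List.length_cons]
    rw [ih]
    rw [horner_shift base rest (0 * base + d)]
    simp only [Prod.mk.injEq]
    exact ⟨by ring, by ring⟩

-- ===== VERDICT (by name: the statement is the Claim_ definition above) =====
theorem alphabetToBase10_spec : Claim_equal_alphabetToBase10 := by
  intro statement alphabet _
  unfold Spec_alphabetToBase10 alphabetToBase10 alphabetToBase10_alt
  simp only [revweight_eq_horner, List.foldl_filter, List.foldl_map, one_mul, zero_add]
  congr 1
  funext n s
  split <;> simp_all
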